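-- pv_equiv track=rewrite | github.com/dufq/malicious-URL-detection | feature_extraction.py | numAndLetter
-- ===== SOURCE A (Python) =====
-- def is_letter(x):
--     if (97 <= ord(x) <= 122) or (65 <= ord(x) <= 90):
--         return True
--     return False
--
-- def numAndLetter(token):
--     if len(token) < 2:
--         return 0
--     num = 0
--     pre = 1
--     cur = 0
--     # 0 表示字母 1表示非字母
--     if is_letter(token[0]):
--         pre = 0
--     else:
--         pre = 1
--     for i in range(1, len(token)):
--         if is_letter(token[i]):
--             cur = 0
--         else:
--             cur = 1
--         if cur == pre:
--             continue
--         else: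
--             num += 1
--             pre = cur
--     return num
-- ===== SOURCE B (Python) =====
-- def is_letter(x):
--     if (97 <= ord(x) <= 122) or (65 <= ord(x) <= 90):
--         return True
--     return False
--
-- def numAndLetter(token):
--     # The number of letter/non-letter transitions equals the number of
--     # maximal same-class runs minus one.  Walk the string run by run:
--     # the outer loop counts runs, the inner loop skips over one whole run.
--     n = len(token)
--     runs = 0
--     i = 0
--     while i < n:
--         k = is_letter(token[i])
--         i += 1
--         while i < n and is_letter(token[i]) == k:
--             i += 1
--         runs += 1
--     return runs - 1 if runs else 0
-- ===== Notes on version B (the rewrite author's own statement) =====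
-- stated objective: alternative
-- what changed: B uses run-length decomposition: a nested skip-one-run loop counts the maximal same-class runs and returns runs-1, instead of A's per-character pre/cur comparison accumulating transitions.
import Mathlib
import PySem

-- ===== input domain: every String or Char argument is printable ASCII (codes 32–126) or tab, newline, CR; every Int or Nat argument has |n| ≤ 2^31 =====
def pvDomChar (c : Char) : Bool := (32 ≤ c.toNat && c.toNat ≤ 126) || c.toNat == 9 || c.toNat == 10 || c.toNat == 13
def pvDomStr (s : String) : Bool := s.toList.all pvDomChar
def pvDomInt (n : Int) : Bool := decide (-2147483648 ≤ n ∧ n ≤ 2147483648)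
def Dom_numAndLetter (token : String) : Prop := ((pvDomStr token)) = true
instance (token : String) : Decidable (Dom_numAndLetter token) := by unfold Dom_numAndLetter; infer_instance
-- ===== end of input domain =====

-- B counts maximal same-class runs (nested skip-one-run loop) and returns runs-1, instead of A's per-character pre/cur transition accumulation; alternative decomposition, same cost.


-- ===== PORT A =====
-- is_letter, exact ord-range test from A
def isLetterA (x : Char) : Bool :=
  if (97 ≤ x.toNat ∧ x.toNat ≤ 122) ∨ (65 ≤ x.toNat ∧ x.toNat ≤ 90) then true else false

-- the for-loop of A over indices 1..len-1, carrying (pre, num)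
def loopA : List Char → Int → Int → Int
  | [], _, num => num
  | c :: rest, pre, num =>
    let cur : Int := if isLetterA c then 0 else 1
    if cur = pre then loopA rest pre num
    else loopA rest cur (num + 1)

def numAndLetter (token : String) : Int :=
  let cs := token.toList
  if cs.length < 2 then 0
  else
    match cs with
    | [] => 0
    | c :: rest => loopA rest (if isLetterA c then 0 else 1) 0

-- ===== PORT B =====
-- inner while loop of B: skip the remainder of the current run of class k
def skipRun (k : Bool) : List Char → List Char
  | [] => []
  | c :: rest => if isLetterA c = k then skipRun k rest else c :: rest

theorem skipRun_length_le (k : Bool) (l : List Char) : (skipRun k l).length ≤ l.length := by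
  induction l with
  | nil => simp [skipRun]
  | cons c rest ih =>
    simp only [skipRun]
    split
    · exact Nat.le_succ_of_le ih
    · exact Nat.le_refl _

-- outer while loop of B: count maximal same-class runs
def countRuns : List Char → Nat
  | [] => 0
  | c :: rest => countRuns (skipRun (isLetterA c) rest) + 1
  termination_by l => l.length
  decreasing_by exact Nat.lt_succ_of_le (skipRun_length_le _ _)

def numAndLetter_alt (token : String) : Int :=
  let runs := countRuns token.toList
  if runs ≠ 0 then (runs : Int) - 1 else 0

-- ===== PRECONDITION & SPEC =====
def Spec_numAndLetter (token : String) (out : Int) : Prop := out = numAndLetter_alt token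
instance (token : String) (out : Int) : Decidable (Spec_numAndLetter token out) := by unfold Spec_numAndLetter; infer_instance

-- ===== CLAIM (what is proved, stated in full; the proofs are below) =====
def Claim_equal_numAndLetter : Prop := ∀ (token : String), Dom_numAndLetter token → Spec_numAndLetter token (numAndLetter token)

-- ===== LEMMAS AND PROOFS =====
-- number of class transitions in b :: classes(l)
def transA : Bool → List Char → Int
  | _, [] => 0
  | b, c :: l => if isLetterA c = b then transA b l else 1 + transA (isLetterA c) l

theorem loopA_eq (rest : List Char) : ∀ (b : Bool) (num : Int),
    loopA rest (if b then 0 else 1) num = num + transA b rest := by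
  induction rest with
  | nil => intro b num; simp [loopA, transA]
  | cons c rs ih =>
    intro b num
    by_cases h : isLetterA c = b
    · cases hb : b <;> simp_all [loopA, transA]
    · cases hb : b <;> cases hc : isLetterA c <;> simp_all [loopA, transA] <;> omega

theorem transA_eq_countRuns_skip : ∀ (l : List Char) (k : Bool),
    transA k l = (countRuns (skipRun k l) : Int) := by
  intro l
  induction l with
  | nil => intro k; simp [transA, skipRun, countRuns]
  | cons c rest ih =>
    intro k
    by_cases h : isLetterA c = k
    · simp [transA, skipRun, h, ih]
    · simp only [transA, skipRun, h, if_false]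
      rw [countRuns, ih (isLetterA c)]
      push_cast
      ring

-- ===== VERDICT (by name: the statement is the Claim_ definition above) =====
theorem numAndLetter_spec : Claim_equal_numAndLetter := by
  unfold Claim_equal_numAndLetter
  intro token _
  unfold Spec_numAndLetter numAndLetter numAndLetter_alt
  match h : token.toList with
  | [] => simp [countRuns]
  | [c] => simp [countRuns, skipRun]
  | c :: d :: rs =>
    simp only [List.length_cons]
    rw [if_neg (by omega)]
    have hl := loopA_eq (d :: rs) (isLetterA c) 0
    rw [show (if isLetterA c then (0:Int) else 1) = (if (isLetterA c) = true then 0 else 1) by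
      cases isLetterA c <;> simp] at hl ⊢
    rw [hl, zero_add, transA_eq_countRuns_skip]
    rw [show countRuns (c :: d :: rs) = countRuns (skipRun (isLetterA c) (d :: rs)) + 1 from
      countRuns.eq_def (c :: d :: rs) ▸ rfl]
    simp
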